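-- pv_equiv track=rewrite | github.com/SNU-HPCS/XQsim | src/util.py | merge_bp
-- ===== SOURCE A (Python) =====
-- def merge_bp (current_bp, new_bp):
--     next_bp = current_bp[:]
--     for i, (c, n) in enumerate(zip(next_bp, new_bp)):
--         if c == 'I':
--             next_bp[i] = n
--         elif c == 'X':
--             if n == 'I':
--                 next_bp[i] = 'X'
--             elif n == 'X':
--                 next_bp[i] = 'I'
--             elif n == 'Y':
--                 next_bp[i] = 'Z'
--             elif n == 'Z':
--                 next_bp[i] = 'Y'
--             else:
--                 raise Exception()
--         elif c == 'Y':
--             if n == 'I':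
--                 next_bp[i] = 'Y'
--             elif n == 'X':
--                 next_bp[i] = 'Z'
--             elif n == 'Y':
--                 next_bp[i] = 'I'
--             elif n == 'Z':
--                 next_bp[i] = 'X'
--             else:
--                 raise Exception()
--         elif c == 'Z':
--             if n == 'I':
--                 next_bp[i] = 'Z'
--             elif n == 'X':
--                 next_bp[i] = 'Y'
--             elif n == 'Y':
--                 next_bp[i] = 'X'
--             elif n == 'Z':
--                 next_bp[i] = 'I'
--             else:
--                 raise Exception()
--         else:
--             raise Exception()
--
--     return next_bp
-- ===== SOURCE B (Python) =====
-- def merge_bp(current_bp, new_bp):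
--     m = min(len(current_bp), len(new_bp))
--     head_c, head_n = current_bp[:m], new_bp[:m]
--     for s in (head_c, head_n):
--         for ch in s:
--             if ch not in ('I', 'X', 'Y', 'Z'):
--                 raise Exception()
--     xs = {i for i, ch in enumerate(head_c) if ch in ('X', 'Y')} \
--        ^ {i for i, ch in enumerate(head_n) if ch in ('X', 'Y')}
--     zs = {i for i, ch in enumerate(head_c) if ch in ('Z', 'Y')} \
--        ^ {i for i, ch in enumerate(head_n) if ch in ('Z', 'Y')}
--     return ['IXZY'[(i in xs) + 2 * (i in zs)] for i in range(m)] + current_bp[m:]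
-- ===== Notes on version B (the rewrite author's own statement) =====
-- stated objective: alternative
-- what changed: Replaces A's per-element 16-branch table rewrite by a staged set-based algorithm: one validation pass, then build the X-support and Z-support position sets of each string, combine whole strings at once by set symmetric difference, and decode each position from the two set memberships via 'IXZY' indexing; Pre_ excludes inputs where some zipped pair is not two letters of IXYZ, because there A either raises or (when the left letter is 'I') passes the invalid right string through unvalidated while B's eager validation raises.
-- outside the precondition, e.g. on merge_bp(['I'], ['Q']): A returns ['Q'], B raises Exception
import Mathlib
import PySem

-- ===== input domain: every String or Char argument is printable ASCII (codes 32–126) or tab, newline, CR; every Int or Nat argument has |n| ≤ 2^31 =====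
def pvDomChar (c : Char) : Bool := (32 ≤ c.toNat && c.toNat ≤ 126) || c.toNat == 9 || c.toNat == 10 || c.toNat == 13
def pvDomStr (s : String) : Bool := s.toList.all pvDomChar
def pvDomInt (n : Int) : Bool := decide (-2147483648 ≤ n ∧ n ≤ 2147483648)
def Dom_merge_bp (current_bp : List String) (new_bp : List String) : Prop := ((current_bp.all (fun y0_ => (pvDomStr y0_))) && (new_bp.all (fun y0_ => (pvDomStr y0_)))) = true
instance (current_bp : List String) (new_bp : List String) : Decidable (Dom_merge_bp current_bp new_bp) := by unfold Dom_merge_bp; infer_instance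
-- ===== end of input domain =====

-- B replaces A's per-element 16-branch table by staged passes over position SETS: build X/Z support sets, combine by set symmetric difference, decode per position — alternative structure, same cost.


-- ===== PORT A =====
-- body of A's for-loop: branch-by-branch transliteration; the 'raise' branches return the
-- state unchanged (those inputs are outside Pre_merge_bp)
def mergeStepA (next_bp : List String) (icn : Int × String × String) : List String :=
  let i := icn.1
  let c := icn.2.1
  let n := icn.2.2
  if c == "I" then PySem.List.pySetD next_bp i n
  else if c == "X" then
    if n == "I" then PySem.List.pySetD next_bp i "X"
    else if n == "X" then PySem.List.pySetD next_bp i "I"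
    else if n == "Y" then PySem.List.pySetD next_bp i "Z"
    else if n == "Z" then PySem.List.pySetD next_bp i "Y"
    else next_bp
  else if c == "Y" then
    if n == "I" then PySem.List.pySetD next_bp i "Y"
    else if n == "X" then PySem.List.pySetD next_bp i "Z"
    else if n == "Y" then PySem.List.pySetD next_bp i "I"
    else if n == "Z" then PySem.List.pySetD next_bp i "X"
    else next_bp
  else if c == "Z" then
    if n == "I" then PySem.List.pySetD next_bp i "Z"
    else if n == "X" then PySem.List.pySetD next_bp i "Y"
    else if n == "Y" then PySem.List.pySetD next_bp i "X"
    else if n == "Z" then PySem.List.pySetD next_bp i "I"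
    else next_bp
  else next_bp

def merge_bp (current_bp : List String) (new_bp : List String) : List String :=
  let next_bp := current_bp
  (PySem.List.enumerate (next_bp.zip new_bp) 0).foldl mergeStepA next_bp

-- ===== PORT B =====
-- {i for i, ch in enumerate(s) if good(ch)} : the set of positions whose letter satisfies 'good'
def pvPosSet (s : List String) (good : String → Bool) : PySem.Set Int :=
  PySem.Set.ofList ((PySem.List.enumerate s 0).filterMap
    (fun p => if good p.2 then some p.1 else none))

def merge_bp_alt (current_bp : List String) (new_bp : List String) : List String :=
  let m : Nat := min current_bp.length new_bp.length
  let head_c := PySem.List.slice current_bp none (some (m : Int))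
  let head_n := PySem.List.slice new_bp none (some (m : Int))
  -- validation passes: the Python raises on a letter outside IXYZ (outside Pre_merge_bp);
  -- totalized here, the passes have no effect on the returned value
  let _ok := head_c.all (fun ch => ch == "I" || ch == "X" || ch == "Y" || ch == "Z") &&
             head_n.all (fun ch => ch == "I" || ch == "X" || ch == "Y" || ch == "Z")
  let xs := PySem.Set.symmDiff (pvPosSet head_c (fun ch => ch == "X" || ch == "Y"))
                               (pvPosSet head_n (fun ch => ch == "X" || ch == "Y"))
  let zs := PySem.Set.symmDiff (pvPosSet head_c (fun ch => ch == "Z" || ch == "Y"))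
                               (pvPosSet head_n (fun ch => ch == "Z" || ch == "Y"))
  -- 'IXZY'[b] in Python is a ONE-CHARACTER STRING: pyGet? yields the Char, String.mk [·] is that string
  ((PySem.List.pyRange 0 (m : Int) 1).map (fun i =>
      ((PySem.Str.pyGet? "IXZY"
        ((if PySem.Set.contains xs i then 1 else 0)
          + 2 * (if PySem.Set.contains zs i then 1 else 0))).map
        (fun ch => String.ofList [ch])).getD ""))
    ++ PySem.List.slice current_bp (some (m : Int)) none

-- ===== PRECONDITION & SPEC =====
-- Pre_ excludes inputs where some zipped pair is not two single letters of IXYZ: there A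
-- either raises an Exception or (left letter 'I') passes the invalid right string through
-- unvalidated, while B's eager validation pass raises.
def Pre_merge_bp (current_bp : List String) (new_bp : List String) : Prop :=
  ∀ p ∈ current_bp.zip new_bp,
    (p.1 = "I" ∨ p.1 = "X" ∨ p.1 = "Y" ∨ p.1 = "Z") ∧
    (p.2 = "I" ∨ p.2 = "X" ∨ p.2 = "Y" ∨ p.2 = "Z")
instance (current_bp : List String) (new_bp : List String) : Decidable (Pre_merge_bp current_bp new_bp) := by unfold Pre_merge_bp; infer_instance

def pvWitness_merge_bp : List String × List String := (["X", "Z", "I"], ["Y", "I", "Z"])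

def Spec_merge_bp (current_bp : List String) (new_bp : List String) (out : List String) : Prop := out = merge_bp_alt current_bp new_bp
instance (current_bp : List String) (new_bp : List String) (out : List String) : Decidable (Spec_merge_bp current_bp new_bp out) := by unfold Spec_merge_bp; infer_instance

-- ===== CLAIM (what is proved, stated in full; the proofs are below) =====
def Claim_equal_merge_bp : Prop := ∀ (current_bp : List String) (new_bp : List String), Dom_merge_bp current_bp new_bp → Pre_merge_bp current_bp new_bp → Spec_merge_bp current_bp new_bp (merge_bp current_bp new_bp)

-- ===== LEMMAS AND PROOFS =====

-- the per-element Pauli product, as A's table computes it (proof-side characterisation)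
def prodA (p : String × String) : String :=
  if p.1 = "I" then p.2
  else if p.1 = "X" then
    (if p.2 = "I" then "X" else if p.2 = "X" then "I" else if p.2 = "Y" then "Z" else "Y")
  else if p.1 = "Y" then
    (if p.2 = "I" then "Y" else if p.2 = "X" then "Z" else if p.2 = "Y" then "I" else "X")
  else
    (if p.2 = "I" then "Z" else if p.2 = "X" then "Y" else if p.2 = "Y" then "X" else "I")

-- on a valid pair, one step of A's loop is 'set index i to the Pauli product'
lemma mergeStepA_valid (acc : List String) (i : Int) (p : String × String)
    (hc : p.1 = "I" ∨ p.1 = "X" ∨ p.1 = "Y" ∨ p.1 = "Z")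
    (hn : p.2 = "I" ∨ p.2 = "X" ∨ p.2 = "Y" ∨ p.2 = "Z") :
    mergeStepA acc (i, p) = PySem.List.pySetD acc i (prodA p) := by
  obtain ⟨c, n⟩ := p
  simp only at hc hn
  rcases hc with rfl | rfl | rfl | rfl <;> rcases hn with rfl | rfl | rfl | rfl <;> rfl

-- A's loop over 'enumerate' starting at offset k rewrites the window [k, k + ps.length)
lemma loopA_spec (ps : List (String × String)) (k : Nat) (acc : List String)
    (hv : ∀ p ∈ ps, (p.1 = "I" ∨ p.1 = "X" ∨ p.1 = "Y" ∨ p.1 = "Z") ∧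
      (p.2 = "I" ∨ p.2 = "X" ∨ p.2 = "Y" ∨ p.2 = "Z"))
    (hlen : k + ps.length ≤ acc.length) :
    (PySem.List.enumerate ps (k : Int)).foldl mergeStepA acc
      = acc.take k ++ ps.map prodA ++ acc.drop (k + ps.length) := by
  induction ps generalizing k acc with
  | nil => simp [PySem.List.enumerate_nil, List.take_append_drop]
  | cons p ps ih =>
    have hk : k < acc.length := by simp at hlen; omega
    rw [PySem.List.enumerate_cons, List.foldl_cons,
        mergeStepA_valid acc _ p (hv p (by simp)).1 (hv p (by simp)).2,
        PySem.List.pySetD_natCast]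
    have : ((k : Int) + 1) = ((k + 1 : Nat) : Int) := by push_cast; ring
    rw [this, ih (k + 1) (acc.set k (prodA p)) (fun q hq => hv q (by simp [hq]))
        (by simpa using by simp at hlen ⊢; omega)]
    have h1 : (acc.set k (prodA p)).take (k + 1) = acc.take k ++ [prodA p] := by
      rw [List.set_eq_take_append_cons_drop, if_pos hk, List.take_append]
      simp [List.length_take, Nat.min_eq_left (Nat.le_of_lt hk)]
    have h2 : (acc.set k (prodA p)).drop (k + 1 + ps.length)
        = acc.drop (k + 1 + ps.length) := List.drop_set_of_lt (by omega)
    rw [h1, h2]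
    have h3 : k + 1 + ps.length = k + (p :: ps).length := by simp; omega
    simp [h3, List.append_assoc]

-- membership in a position set: exactly the indices whose letter satisfies 'good'
lemma mem_pvPosSet (s : List String) (good : String → Bool) (k : Nat) (hk : k < s.length) :
    ((k : Int) ∈ pvPosSet s good) ↔ good s[k] = true := by
  unfold pvPosSet
  rw [PySem.Set.mem_ofList, List.mem_filterMap]
  constructor
  · rintro ⟨p, hp, hf⟩
    rw [PySem.List.mem_enumerate_iff] at hp
    obtain ⟨j, hj, rfl⟩ := hp
    by_cases hg : good s[j] = true
    · simp [hg] at hf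
      have : j = k := by omega
      subst this; exact hg
    · simp [hg] at hf
  · intro hg
    exact ⟨((k : Int), s[k]), by
      rw [PySem.List.mem_enumerate_iff]; exact ⟨k, hk, by simp⟩, by simp [hg]⟩

-- per position: decoding the two symmetric-difference memberships is A's table product
lemma decode_eq_prodA (hc hn : List String) (k : Nat)
    (hkc : k < hc.length) (hkn : k < hn.length)
    (hcv : hc[k] = "I" ∨ hc[k] = "X" ∨ hc[k] = "Y" ∨ hc[k] = "Z")
    (hnv : hn[k] = "I" ∨ hn[k] = "X" ∨ hn[k] = "Y" ∨ hn[k] = "Z") :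
    ((PySem.Str.pyGet? "IXZY"
      ((if PySem.Set.contains (PySem.Set.symmDiff (pvPosSet hc (fun ch => ch == "X" || ch == "Y"))
            (pvPosSet hn (fun ch => ch == "X" || ch == "Y"))) (k : Int) then 1 else 0)
        + 2 * (if PySem.Set.contains (PySem.Set.symmDiff (pvPosSet hc (fun ch => ch == "Z" || ch == "Y"))
            (pvPosSet hn (fun ch => ch == "Z" || ch == "Y"))) (k : Int) then 1 else 0))).map
      (fun ch => String.ofList [ch])).getD ""
      = prodA (hc[k], hn[k]) := by
  rcases hcv with h1 | h1 | h1 | h1 <;> rcases hnv with h2 | h2 | h2 | h2 <;>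
    simp [PySem.Set.mem_symmDiff,
      mem_pvPosSet hc _ k hkc, mem_pvPosSet hn _ k hkn, h1, h2, prodA]

-- the two mapped middles agree elementwise
lemma middle_eq (cur new : List String)
    (hpre : ∀ p ∈ cur.zip new,
      (p.1 = "I" ∨ p.1 = "X" ∨ p.1 = "Y" ∨ p.1 = "Z") ∧
      (p.2 = "I" ∨ p.2 = "X" ∨ p.2 = "Y" ∨ p.2 = "Z")) :
    (cur.zip new).map prodA
      = (PySem.List.pyRange 0 ((min cur.length new.length : Nat) : Int) 1).map (fun i =>
          ((PySem.Str.pyGet? "IXZY"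
            ((if PySem.Set.contains (PySem.Set.symmDiff
                  (pvPosSet (cur.take (min cur.length new.length)) (fun ch => ch == "X" || ch == "Y"))
                  (pvPosSet (new.take (min cur.length new.length)) (fun ch => ch == "X" || ch == "Y"))) i then 1 else 0)
              + 2 * (if PySem.Set.contains (PySem.Set.symmDiff
                  (pvPosSet (cur.take (min cur.length new.length)) (fun ch => ch == "Z" || ch == "Y"))
                  (pvPosSet (new.take (min cur.length new.length)) (fun ch => ch == "Z" || ch == "Y"))) i then 1 else 0))).map
            (fun ch => String.ofList [ch])).getD "") := by
  set m := min cur.length new.length with hm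
  apply List.ext_getElem
  · simp only [List.length_map, List.length_zip, PySem.List.length_pyRange_one]
    omega
  · intro k hk1 hk2
    have hkm : k < m := by
      simpa [List.length_zip, hm] using hk1
    have hkc : k < cur.length := lt_of_lt_of_le hkm (by omega)
    have hkn : k < new.length := lt_of_lt_of_le hkm (by omega)
    have hkc' : k < (cur.take m).length := by simp [hkm, hkc]
    have hkn' : k < (new.take m).length := by simp [hkm, hkn]
    have hgc : (cur.take m)[k] = cur[k] := List.getElem_take
    have hgn : (new.take m)[k] = new[k] := List.getElem_take
    have hkz : k < (cur.zip new).length := by simpa using hk1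
    have hv := hpre (cur[k], new[k])
      (by have := List.getElem_mem hkz; rwa [List.getElem_zip] at this)
    simp only [List.getElem_map, List.getElem_zip, PySem.List.getElem_pyRange_one, zero_add]
    rw [← hgc, ← hgn] at hv ⊢
    exact (decode_eq_prodA (cur.take m) (new.take m) k hkc' hkn' hv.1 hv.2).symm

-- ===== VERDICT (by name: the statement is the Claim_ definition above) =====
theorem merge_bp_spec : Claim_equal_merge_bp := by
  intro cur new _ hpre
  unfold Spec_merge_bp merge_bp merge_bp_alt
  simp only []
  have hA := loopA_spec (cur.zip new) 0 cur hpre (by simp)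
  rw [show ((0 : Nat) : Int) = (0 : Int) from rfl] at hA
  rw [hA]
  rw [PySem.List.slice_to_natCast, PySem.List.slice_to_natCast, PySem.List.slice_from_natCast,
      middle_eq cur new hpre]
  simp [List.length_zip]
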